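-- pv_equiv track=rewrite | github.com/YuexinChen96/IO-Code | backend/TechLauncherDesign/Backend_Logic/LogicCalculation/dataResult_and_jsonFormat.py | get_color_consumption
-- ===== SOURCE A (Python) =====
-- def get_color_consumption(plan):
--     color = ['#E6FCF4' for i in range(24)] #green
--     if plan == 1:
--         for i in range(24):
--             if 1 <= i <= 5:
--                 color[i] = '#E6FCF4' #green
--             elif 10 <= i <= 14:
--                 color[i] = '#F6F5FF' #purple
--             elif 17 <= i <= 20:
--                 color[i] = '#FFF3F8' #red
--             else:
--                 color[i] = '#FFF9CC' #yellow
--     elif plan == 2: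
--         for i in range(24):
--             if 1 <= i <= 5:
--                 color[i] = '#E6FCF4' # green
--             elif 10 <= i <= 14:
--                 color[i] = '#FFF3F8' # red
--             else:
--                 color[i] = '#F6F5FF' # purple
--     elif plan == 4:
--         for i in range(24):
--             if 7 <= i <= 16:
--                 color[i] = '#E6FCF4' # green
--             elif 17 <= i <= 20:
--                 color[i] = '#FFF3F8' # red
--             else:
--                 color[i] = '#F6F5FF' # purple
--     elif plan == 5:
--         for i in range(24):
--             if 7 <= i <= 20:
--                 color[i] = '#E6FCF4' #green
--             else:
--                 color[i] = '#FFF3F8' #red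
--     return color
-- ===== SOURCE B (Python) =====
-- def get_color_consumption(plan):
--     G, P, R, Y = '#E6FCF4', '#F6F5FF', '#FFF3F8', '#FFF9CC'
--     segments = {
--         1: [(Y, 1), (G, 5), (Y, 4), (P, 5), (Y, 2), (R, 4), (Y, 3)],
--         2: [(P, 1), (G, 5), (P, 4), (R, 5), (P, 9)],
--         4: [(P, 7), (G, 10), (R, 4), (P, 3)],
--         5: [(R, 7), (G, 14), (R, 3)],
--     }
--     out = []
--     for c, n in segments.get(plan, [(G, 24)]):
--         out += [c] * n
--     return out
-- ===== Notes on version B (the rewrite author's own statement) =====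
-- stated objective: simpler
-- what changed: Replaces the per-plan hour-by-hour loops with range-membership conditionals by a per-plan run-length table of (color, count) segments concatenated once; unknown plans fall out of the table lookup as a single all-green segment.
import Mathlib
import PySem

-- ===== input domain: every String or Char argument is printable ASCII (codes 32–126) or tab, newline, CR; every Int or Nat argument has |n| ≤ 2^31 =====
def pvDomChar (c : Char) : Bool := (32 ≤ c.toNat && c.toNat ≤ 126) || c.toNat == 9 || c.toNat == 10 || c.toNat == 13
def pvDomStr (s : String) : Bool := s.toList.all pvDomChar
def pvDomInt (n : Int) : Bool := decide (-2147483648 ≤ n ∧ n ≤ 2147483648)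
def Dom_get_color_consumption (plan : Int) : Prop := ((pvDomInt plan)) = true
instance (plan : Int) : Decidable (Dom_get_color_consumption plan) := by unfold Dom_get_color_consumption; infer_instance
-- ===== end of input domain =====

-- B replaces the per-index loops with conditionals by a run-length segment table concatenated once (objective: simpler).

-- ===== PORT A =====
def get_color_consumption (plan : Int) : List String :=
  let color : List String := (PySem.List.pyRange 0 24 1).map (fun _ => "#E6FCF4")
  if plan = 1 then
    (PySem.List.pyRange 0 24 1).foldl (fun c i =>
      if 1 ≤ i ∧ i ≤ 5 then c.set i.toNat "#E6FCF4"
      else if 10 ≤ i ∧ i ≤ 14 then c.set i.toNat "#F6F5FF"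
      else if 17 ≤ i ∧ i ≤ 20 then c.set i.toNat "#FFF3F8"
      else c.set i.toNat "#FFF9CC") color
  else if plan = 2 then
    (PySem.List.pyRange 0 24 1).foldl (fun c i =>
      if 1 ≤ i ∧ i ≤ 5 then c.set i.toNat "#E6FCF4"
      else if 10 ≤ i ∧ i ≤ 14 then c.set i.toNat "#FFF3F8"
      else c.set i.toNat "#F6F5FF") color
  else if plan = 4 then
    (PySem.List.pyRange 0 24 1).foldl (fun c i =>
      if 7 ≤ i ∧ i ≤ 16 then c.set i.toNat "#E6FCF4"
      else if 17 ≤ i ∧ i ≤ 20 then c.set i.toNat "#FFF3F8"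
      else c.set i.toNat "#F6F5FF") color
  else if plan = 5 then
    (PySem.List.pyRange 0 24 1).foldl (fun c i =>
      if 7 ≤ i ∧ i ≤ 20 then c.set i.toNat "#E6FCF4"
      else c.set i.toNat "#FFF3F8") color
  else color

-- ===== PORT B =====
def pvSegments_gcc (plan : Int) : List (String × Nat) :=
  (PySem.Dict.ofList
    [((1 : Int), [("#FFF9CC", 1), ("#E6FCF4", 5), ("#FFF9CC", 4), ("#F6F5FF", 5), ("#FFF9CC", 2), ("#FFF3F8", 4), ("#FFF9CC", 3)]),
     (2, [("#F6F5FF", 1), ("#E6FCF4", 5), ("#F6F5FF", 4), ("#FFF3F8", 5), ("#F6F5FF", 9)]),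
     (4, [("#F6F5FF", 7), ("#E6FCF4", 10), ("#FFF3F8", 4), ("#F6F5FF", 3)]),
     (5, [("#FFF3F8", 7), ("#E6FCF4", 14), ("#FFF3F8", 3)])]).getD plan [("#E6FCF4", 24)]

def get_color_consumption_alt (plan : Int) : List String :=
  (pvSegments_gcc plan).foldl (fun out cn => out ++ List.replicate cn.2 cn.1) []

-- ===== PRECONDITION & SPEC =====
def Spec_get_color_consumption (plan : Int) (out : List String) : Prop := out = get_color_consumption_alt plan
instance (plan : Int) (out : List String) : Decidable (Spec_get_color_consumption plan out) := by unfold Spec_get_color_consumption; infer_instance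

-- ===== CLAIM (what is proved, stated in full; the proofs are below) =====
def Claim_equal_get_color_consumption : Prop := ∀ (plan : Int), Dom_get_color_consumption plan → Spec_get_color_consumption plan (get_color_consumption plan)

-- ===== LEMMAS AND PROOFS =====

-- ===== VERDICT (by name: the statement is the Claim_ definition above) =====
theorem get_color_consumption_spec : Claim_equal_get_color_consumption := by
  intro plan _
  show get_color_consumption plan = get_color_consumption_alt plan
  by_cases h1 : plan = 1
  · subst h1; decide
  by_cases h2 : plan = 2
  · subst h2; decide
  by_cases h4 : plan = 4
  · subst h4; decide
  by_cases h5 : plan = 5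
  · subst h5; decide
  · have e1 : ((1 : Int) == plan) = false := by simp [Ne.symm h1]
    have e2 : ((2 : Int) == plan) = false := by simp [Ne.symm h2]
    have e4 : ((4 : Int) == plan) = false := by simp [Ne.symm h4]
    have e5 : ((5 : Int) == plan) = false := by simp [Ne.symm h5]
    simp only [get_color_consumption, get_color_consumption_alt, pvSegments_gcc,
      if_neg h1, if_neg h2, if_neg h4, if_neg h5]
    simp [PySem.Dict.ofList, PySem.Dict.getD, PySem.Dict.get?, PySem.Dict.empty,
      PySem.Dict.update, PySem.Dict.insert, e1, e2, e4, e5, PySem.List.pyRange]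
    rfl
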